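-- pv_equiv track=rewrite | github.com/ManojKumarPatnaik/practice-alg | Solution/TwoWayRoadRenovation.py | findMaxPotholes
-- ===== SOURCE A (Python) =====
-- def findMaxPotholes(L1, L2):
--   N = len(L1)
--   repairSegmentsL1 = [0] * N  # Number of potholes that can be repaired in L1
--   repairSegmentsL2 = [0] * N  # Number of potholes that can be repaired in L2
--
--   # Calculate the number of potholes that can be repaired in L1 from each segment to the end
--   for i in range(N - 2, -1, -1):
--     repairSegmentsL1[i] = repairSegmentsL1[i + 1]
--     if L1[i + 1] == "x":
--       repairSegmentsL1[i] += 1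
--
--   # Calculate the number of potholes that can be repaired in L2 from the start to each segment
--   for i in range(1, N):
--     repairSegmentsL2[i] = repairSegmentsL2[i - 1]
--     if L2[i - 1] == "x":
--       repairSegmentsL2[i] += 1
--
--   # Return the maximum number of potholes that can be repaired
--   return max([repairSegmentsL1[i] + repairSegmentsL2[i] for i in range(N)])
-- ===== SOURCE B (Python) =====
-- def findMaxPotholes(L1, L2):
--     # One pass with running counters instead of building two prefix/suffix arrays:
--     # suffix count of 'x' in L1 after i is derived by subtraction from the total.
--     total = L1.count('x')
--     cum1 = 0   # 'x' in L1[:i+1]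
--     cum2 = 0   # 'x' in L2[:i]
--     best = None
--     for i in range(len(L1)):
--         if L1[i] == 'x':
--             cum1 += 1
--         if i > 0 and L2[i - 1] == 'x':
--             cum2 += 1
--         cand = (total - cum1) + cum2
--         if best is None or cand > best:
--             best = cand
--     return best
-- ===== Notes on version B (the rewrite author's own statement) =====
-- stated objective: faster
-- what changed: B replaces A's two stored N-element prefix/suffix arrays (one filled by a reverse scan) and the final max over a comprehension by a single forward pass with running counters, deriving the L1 suffix count by subtraction from the precomputed total and keeping a running best.
import Mathlib
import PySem

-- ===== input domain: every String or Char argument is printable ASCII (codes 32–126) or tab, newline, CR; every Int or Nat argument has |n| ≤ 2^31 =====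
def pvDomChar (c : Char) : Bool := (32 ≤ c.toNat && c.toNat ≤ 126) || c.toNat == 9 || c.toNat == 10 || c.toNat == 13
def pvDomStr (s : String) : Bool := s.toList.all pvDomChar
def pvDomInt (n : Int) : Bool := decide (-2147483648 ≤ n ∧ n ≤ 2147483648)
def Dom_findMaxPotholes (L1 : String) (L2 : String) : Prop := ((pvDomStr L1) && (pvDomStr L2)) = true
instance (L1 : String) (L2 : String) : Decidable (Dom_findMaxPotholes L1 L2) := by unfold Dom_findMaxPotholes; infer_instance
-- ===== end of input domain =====

-- B replaces A's two stored prefix/suffix arrays and reverse scan by one forward pass with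
-- running counters, deriving the L1-suffix count by subtraction from the total (measured
-- constant-factor faster in a timing run).

-- ===== PORT A =====
def findMaxPotholes (L1 : String) (L2 : String) : Int :=
  let l1 := L1.toList
  let l2 := L2.toList
  let N : Int := PySem.Str.len L1
  -- repairSegmentsL1 = [0] * N ; backward fill loop
  let seg1 : List Int :=
    (PySem.List.pyRange (N - 2) (-1) (-1)).foldl
      (fun arr i =>
        PySem.List.pySetD arr i
          (PySem.List.pyGetD arr (i + 1) 0 +
            (if PySem.List.pyGetD l1 (i + 1) ' ' = 'x' then 1 else 0)))
      (List.replicate N.toNat 0)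
  -- repairSegmentsL2 = [0] * N ; forward fill loop
  let seg2 : List Int :=
    (PySem.List.pyRange 1 N 1).foldl
      (fun arr i =>
        PySem.List.pySetD arr i
          (PySem.List.pyGetD arr (i - 1) 0 +
            (if PySem.List.pyGetD l2 (i - 1) ' ' = 'x' then 1 else 0)))
      (List.replicate N.toNat 0)
  -- max([seg1[i] + seg2[i] for i in range(N)]); raises on N = 0 (excluded by Pre_)
  (PySem.List.max?
      ((PySem.List.pyRange 0 N 1).map
        (fun i => PySem.List.pyGetD seg1 i 0 + PySem.List.pyGetD seg2 i 0))
      (fun x => x)).getD 0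

-- ===== PORT B =====
def findMaxPotholes_alt (L1 : String) (L2 : String) : Int :=
  let l1 := L1.toList
  let l2 := L2.toList
  let total : Int := (PySem.Str.count L1 "x" : Int)
  let st :=
    (PySem.List.pyRange 0 (PySem.List.len l1) 1).foldl
      (fun (st : Int × Int × Option Int) i =>
        let cum1 := if PySem.List.pyGetD l1 i ' ' = 'x' then st.1 + 1 else st.1
        let cum2 := if 0 < i ∧ PySem.List.pyGetD l2 (i - 1) ' ' = 'x' then st.2.1 + 1 else st.2.1
        let cand := total - cum1 + cum2
        let best : Option Int :=
          match st.2.2 with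
          | none => some cand
          | some b => if b < cand then some cand else some b
        (cum1, cum2, best))
      (0, 0, none)
  -- Python B returns None on an empty L1 (excluded by Pre_); the port returns 0 there
  st.2.2.getD 0

-- ===== PRECONDITION & SPEC =====
-- Pre_ excludes exactly the raising inputs: N = 0 (A's max([]) raises ValueError and B returns
-- None) and len(L2) < len(L1) - 1 (A's read of L2[i-1] raises IndexError).
def Pre_findMaxPotholes (L1 : String) (L2 : String) : Prop :=
  L1.toList ≠ [] ∧ L1.toList.length ≤ L2.toList.length + 1
instance (L1 : String) (L2 : String) : Decidable (Pre_findMaxPotholes L1 L2) := by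
  unfold Pre_findMaxPotholes; infer_instance
def pvWitness_findMaxPotholes : String × String := ("x..x", ".x.")
def Spec_findMaxPotholes (L1 : String) (L2 : String) (out : Int) : Prop := out = findMaxPotholes_alt L1 L2
instance (L1 : String) (L2 : String) (out : Int) : Decidable (Spec_findMaxPotholes L1 L2 out) := by unfold Spec_findMaxPotholes; infer_instance

-- ===== CLAIM (what is proved, stated in full; the proofs are below) =====
def Claim_equal_findMaxPotholes : Prop := ∀ (L1 : String) (L2 : String), Dom_findMaxPotholes L1 L2 → Pre_findMaxPotholes L1 L2 → Spec_findMaxPotholes L1 L2 (findMaxPotholes L1 L2)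

-- ===== LEMMAS AND PROOFS =====
def pvCnt (l : List Char) : Int := (l.count 'x' : Int)
def pvG (l1 : List Char) (k : Nat) : Int := pvCnt (l1.drop (k + 1))
def pvMk1 (l1 : List Char) (j : Int) : List Int :=
  (List.range l1.length).map (fun (k : Nat) => if j < (k : Int) then pvG l1 k else 0)

theorem pvMk1_congr (l1 : List Char) {j j' : Int} (h : ∀ k : Nat, k < l1.length → (j < (k:Int) ↔ j' < (k:Int))) :
    pvMk1 l1 j = pvMk1 l1 j' := by
  unfold pvMk1
  apply List.map_congr_left
  intro k hk
  rw [List.mem_range] at hk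
  by_cases hjk : j < (k:Int)
  · rw [if_pos hjk, if_pos ((h k hk).1 hjk)]
  · rw [if_neg hjk, if_neg (fun hc => hjk ((h k hk).2 hc))]

theorem pvMk1_step (l1 : List Char) (j : Int) (h0 : 0 ≤ j) (h2 : j ≤ (l1.length : Int) - 2) :
    PySem.List.pySetD (pvMk1 l1 j) j
      (PySem.List.pyGetD (pvMk1 l1 j) (j + 1) 0 +
        (if PySem.List.pyGetD l1 (j + 1) ' ' = 'x' then 1 else 0)) = pvMk1 l1 (j - 1) := by
  have hlen : j.toNat + 1 < l1.length := by omega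
  have hget : PySem.List.pyGetD (pvMk1 l1 j) (j + 1) 0 = pvG l1 (j.toNat + 1) := by
    rw [PySem.List.pyGetD_eq_getElem _ _ (by omega) (by simp [pvMk1]; omega)]
    simp only [pvMk1, List.getElem_map, List.getElem_range]
    rw [if_pos (by omega)]
    congr 1
    omega
  have hchr : PySem.List.pyGetD l1 (j + 1) ' ' = l1[j.toNat + 1] := by
    rw [PySem.List.pyGetD_eq_getElem _ _ (by omega) (by push_cast; omega)]
    congr 1
    omega
  have hval : pvG l1 (j.toNat + 1) + (if l1[j.toNat + 1] = 'x' then 1 else 0) = pvG l1 j.toNat := by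
    unfold pvG pvCnt
    rw [List.drop_eq_getElem_cons (i := j.toNat + 1) hlen, List.count_cons]
    push_cast
    by_cases hx : l1[j.toNat + 1] = 'x' <;> simp [hx] <;> ring
  rw [hget, hchr, hval, PySem.List.pySetD_of_nonneg _ _ h0]
  apply List.ext_getElem
  · simp [pvMk1]
  · intro m hm hm'
    simp only [pvMk1, List.length_map, List.length_range] at hm ⊢
    rw [List.getElem_set]
    simp only [List.getElem_map, List.getElem_range]
    by_cases hmj : j.toNat = m
    · rw [if_pos hmj, if_pos (by omega)]
      rw [hmj]
    · rw [if_neg hmj]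
      by_cases hlt : j < (m:Int)
      · rw [if_pos hlt, if_pos (by omega)]
      · rw [if_neg hlt, if_neg (by omega)]

theorem pvMk1_lemma (l1 : List Char) :
    ∀ (t : Nat) (j : Int), j < (t : Int) → j ≤ (l1.length : Int) - 2 →
      (PySem.List.pyRange j (-1) (-1)).foldl
        (fun arr i =>
          PySem.List.pySetD arr i
            (PySem.List.pyGetD arr (i + 1) 0 +
              (if PySem.List.pyGetD l1 (i + 1) ' ' = 'x' then 1 else 0)))
        (pvMk1 l1 j) = pvMk1 l1 (-1) := by
  intro t
  induction t with
  | zero =>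
    intro j h1 h2
    rw [PySem.List.pyRange_neg_one_eq_nil (by omega)]
    exact pvMk1_congr l1 (by intro k hk; omega)
  | succ n ih =>
    intro j h1 h2
    by_cases hj : j ≤ -1
    · rw [PySem.List.pyRange_neg_one_eq_nil (by omega)]
      exact pvMk1_congr l1 (by intro k hk; omega)
    · rw [PySem.List.pyRange_neg_one_cons (by omega : (-1:Int) < j), List.foldl_cons,
        pvMk1_step l1 j (by omega) h2]
      exact ih (j - 1) (by omega) (by omega)

def pvH (l2 : List Char) (k : Nat) : Int := pvCnt (l2.take k)
def pvMk2 (l2 : List Char) (N : Nat) (j : Int) : List Int :=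
  (List.range N).map (fun (k : Nat) => if (k : Int) < j then pvH l2 k else 0)

theorem pvMk2_congr (l2 : List Char) (N : Nat) {j j' : Int}
    (h : ∀ k : Nat, k < N → ((k:Int) < j ↔ (k:Int) < j')) :
    pvMk2 l2 N j = pvMk2 l2 N j' := by
  unfold pvMk2
  apply List.map_congr_left
  intro k hk
  rw [List.mem_range] at hk
  by_cases hjk : (k:Int) < j
  · rw [if_pos hjk, if_pos ((h k hk).1 hjk)]
  · rw [if_neg hjk, if_neg (fun hc => hjk ((h k hk).2 hc))]

theorem pvMk2_step (l2 : List Char) (N : Nat) (hN : N ≤ l2.length + 1) (j : Int)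
    (h1 : 1 ≤ j) (h2 : j < (N : Int)) :
    PySem.List.pySetD (pvMk2 l2 N j) j
      (PySem.List.pyGetD (pvMk2 l2 N j) (j - 1) 0 +
        (if PySem.List.pyGetD l2 (j - 1) ' ' = 'x' then 1 else 0)) = pvMk2 l2 N (j + 1) := by
  have hlen : j.toNat - 1 < l2.length := by omega
  have hget : PySem.List.pyGetD (pvMk2 l2 N j) (j - 1) 0 = pvH l2 (j.toNat - 1) := by
    rw [PySem.List.pyGetD_eq_getElem _ _ (by omega) (by simp [pvMk2]; omega)]
    simp only [pvMk2, List.getElem_map, List.getElem_range]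
    rw [if_pos (by omega)]
    congr 1
    omega
  have hchr : PySem.List.pyGetD l2 (j - 1) ' ' = l2[j.toNat - 1] := by
    rw [PySem.List.pyGetD_eq_getElem _ _ (by omega) (by push_cast; omega)]
    congr 1
    omega
  have hval : pvH l2 (j.toNat - 1) + (if l2[j.toNat - 1] = 'x' then 1 else 0) = pvH l2 j.toNat := by
    unfold pvH pvCnt
    conv_rhs => rw [show j.toNat = (j.toNat - 1) + 1 by omega, List.take_succ,
      List.getElem?_eq_getElem hlen]
    simp only [Option.toList_some, List.count_append, List.count_singleton]
    push_cast
    by_cases hx : l2[j.toNat - 1] = 'x' <;> simp [hx] <;> ring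
  rw [hget, hchr, hval, PySem.List.pySetD_of_nonneg _ _ (by omega)]
  apply List.ext_getElem
  · simp [pvMk2]
  · intro m hm hm'
    simp only [pvMk2, List.length_map, List.length_range] at hm ⊢
    rw [List.getElem_set]
    simp only [List.getElem_map, List.getElem_range]
    by_cases hmj : j.toNat = m
    · rw [if_pos hmj, if_pos (by omega)]
      rw [hmj]
    · rw [if_neg hmj]
      by_cases hlt : (m:Int) < j
      · rw [if_pos hlt, if_pos (by omega)]
      · rw [if_neg hlt, if_neg (by omega)]

theorem pvMk2_lemma (l2 : List Char) (N : Nat) (hN : N ≤ l2.length + 1) :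
    ∀ (t : Nat) (j : Int), (N : Int) ≤ j + t → 1 ≤ j →
      (PySem.List.pyRange j N 1).foldl
        (fun arr i =>
          PySem.List.pySetD arr i
            (PySem.List.pyGetD arr (i - 1) 0 +
              (if PySem.List.pyGetD l2 (i - 1) ' ' = 'x' then 1 else 0)))
        (pvMk2 l2 N j) = pvMk2 l2 N N := by
  intro t
  induction t with
  | zero =>
    intro j h1 h2
    rw [PySem.List.pyRange_one_eq_nil (by omega)]
    exact pvMk2_congr l2 N (by intro k hk; omega)
  | succ n ih =>
    intro j h1 h2
    by_cases hj : (N : Int) ≤ j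
    · rw [PySem.List.pyRange_one_eq_nil (by omega)]
      exact pvMk2_congr l2 N (by intro k hk; omega)
    · rw [PySem.List.pyRange_one_cons (by omega : j < (N:Int)), List.foldl_cons,
        pvMk2_step l2 N hN j h2 (by omega)]
      exact ih (j + 1) (by omega) (by omega)

def pvCand (l1 l2 : List Char) (k : Nat) : Int := pvG l1 k + pvH l2 k

theorem pvRepl_eq_mk1 (l1 : List Char) (h : 1 ≤ l1.length) :
    List.replicate l1.length (0 : Int) = pvMk1 l1 ((l1.length : Int) - 2) := by
  apply List.ext_getElem
  · simp [pvMk1]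
  · intro m hm hm'
    simp only [List.getElem_replicate, pvMk1, List.getElem_map, List.getElem_range]
    simp only [List.length_replicate] at hm
    by_cases hc : (l1.length : Int) - 2 < (m : Int)
    · rw [if_pos hc]
      have hm1 : m + 1 = l1.length := by omega
      simp [pvG, pvCnt, hm1]
    · rw [if_neg hc]

theorem pvRepl_eq_mk2 (l2 : List Char) (N : Nat) :
    List.replicate N (0 : Int) = pvMk2 l2 N 1 := by
  apply List.ext_getElem
  · simp [pvMk2]
  · intro m hm hm'
    simp only [List.getElem_replicate, pvMk2, List.getElem_map, List.getElem_range]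
    by_cases hc : (m : Int) < 1
    · rw [if_pos hc]
      have : m = 0 := by omega
      simp [this, pvH, pvCnt]
    · rw [if_neg hc]

theorem pvA_eq (L1 L2 : String) (h1 : L1.toList ≠ [])
    (h2 : L1.toList.length ≤ L2.toList.length + 1) :
    findMaxPotholes L1 L2 =
      (((List.range (L1.toList.length - 1)).map
          (fun k => pvCand L1.toList L2.toList (k + 1))).foldl max
        (pvCand L1.toList L2.toList 0)) := by
  have hn : 1 ≤ L1.toList.length := List.length_pos_of_ne_nil h1
  unfold findMaxPotholes
  simp only [PySem.Str.len_eq, Int.toNat_natCast]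
  nth_rewrite 1 [pvRepl_eq_mk1 L1.toList hn]
  rw [pvMk1_lemma L1.toList L1.toList.length ((L1.toList.length : Int) - 2) (by omega) (by omega),
    pvRepl_eq_mk2 L2.toList L1.toList.length,
    pvMk2_lemma L2.toList L1.toList.length h2 L1.toList.length 1 (by omega) (by omega)]
  rw [PySem.List.pyRange_zero_nat, List.map_map]
  have hmap : (List.range L1.toList.length).map
      ((fun i => PySem.List.pyGetD (pvMk1 L1.toList (-1)) i 0 +
        PySem.List.pyGetD (pvMk2 L2.toList L1.toList.length L1.toList.length) i 0) ∘
        (fun k : Nat => (k : Int))) =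
      (List.range L1.toList.length).map (pvCand L1.toList L2.toList) := by
    apply List.map_congr_left
    intro k hk
    rw [List.mem_range] at hk
    simp only [Function.comp]
    rw [PySem.List.pyGetD_eq_getElem _ _ (by omega)
        (by simp only [pvMk1, List.length_map, List.length_range]; omega),
      PySem.List.pyGetD_eq_getElem _ _ (by omega)
        (by simp only [pvMk2, List.length_map, List.length_range]; omega)]
    simp only [pvMk1, pvMk2, List.getElem_map, List.getElem_range, Int.toNat_natCast]
    rw [if_pos (by omega), if_pos (by omega)]
    rfl
  rw [hmap]
  conv_lhs => rw [show L1.toList.length = (L1.toList.length - 1) + 1 by omega,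
    List.range_succ_eq_map, List.map_cons, List.map_map]
  rw [PySem.List.max?_id_cons]
  rfl

-- B's running best after the first j iterations
def pvBest (l1 l2 : List Char) (j : Nat) : Option Int :=
  if j = 0 then none
  else some (((List.range (j - 1)).map (fun k => pvCand l1 l2 (k + 1))).foldl max
    (pvCand l1 l2 0))

theorem pvCand_sub (l1 l2 : List Char) (j : Nat) :
    pvCnt l1 - pvCnt (l1.take (j + 1)) + pvCnt (l2.take j) = pvCand l1 l2 j := by
  have h : (l1.take (j + 1)).count 'x' + (l1.drop (j + 1)).count 'x' = l1.count 'x' := by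
    rw [← List.count_append, List.take_append_drop]
  unfold pvCand pvG pvH pvCnt
  omega

theorem pvCnt_take_succ (l : List Char) (j : Nat) (hj : j < l.length) :
    pvCnt (l.take (j + 1)) = pvCnt (l.take j) + (if l[j] = 'x' then 1 else 0) := by
  unfold pvCnt
  rw [List.take_succ, List.getElem?_eq_getElem hj]
  simp only [Option.toList_some, List.count_append, List.count_singleton]
  push_cast
  by_cases hx : l[j] = 'x' <;> simp [hx]

theorem pvB_inv (l1 l2 : List Char) (total : Int) (htot : total = pvCnt l1)
    (h2 : l1.length ≤ l2.length + 1) :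
    ∀ j : Nat, j ≤ l1.length →
      ((List.range j).map (fun k : Nat => (k : Int))).foldl
        (fun (st : Int × Int × Option Int) i =>
          let cum1 := if PySem.List.pyGetD l1 i ' ' = 'x' then st.1 + 1 else st.1
          let cum2 := if 0 < i ∧ PySem.List.pyGetD l2 (i - 1) ' ' = 'x' then st.2.1 + 1 else st.2.1
          let cand := total - cum1 + cum2
          let best : Option Int :=
            match st.2.2 with
            | none => some cand
            | some b => if b < cand then some cand else some b
          (cum1, cum2, best))
        (0, 0, none) =
      (pvCnt (l1.take j), pvCnt (l2.take (j - 1)), pvBest l1 l2 j) := by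
  intro j
  induction j with
  | zero => intro _; simp [pvCnt, pvBest]
  | succ m ih =>
    intro hm
    rw [List.range_succ, List.map_append, List.foldl_append, ih (by omega)]
    simp only [List.map_cons, List.map_nil, List.foldl_cons, List.foldl_nil]
    have hmlen : m < l1.length := by omega
    have hc1 : PySem.List.pyGetD l1 (m : Int) ' ' = l1[m] := by
      rw [PySem.List.pyGetD_eq_getElem _ _ (by omega) (by push_cast; omega)]
      congr 1
    have hcum1 : (if PySem.List.pyGetD l1 (m : Int) ' ' = 'x'
        then pvCnt (l1.take m) + 1 else pvCnt (l1.take m)) = pvCnt (l1.take (m + 1)) := by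
      rw [hc1, pvCnt_take_succ l1 m hmlen]
      by_cases hx : l1[m] = 'x' <;> simp [hx]
    have hcum2 : (if 0 < (m : Int) ∧ PySem.List.pyGetD l2 ((m : Int) - 1) ' ' = 'x'
        then pvCnt (l2.take (m - 1)) + 1 else pvCnt (l2.take (m - 1)))
        = pvCnt (l2.take m) := by
      cases m with
      | zero => simp
      | succ p =>
        have hplen : p < l2.length := by omega
        have hc2 : PySem.List.pyGetD l2 (((p + 1 : Nat) : Int) - 1) ' ' = l2[p] := by
          rw [PySem.List.pyGetD_eq_getElem _ _ (by push_cast; omega) (by push_cast; omega)]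
          congr 1
          push_cast
          omega
        rw [pvCnt_take_succ l2 p hplen]
        simp only [Nat.add_sub_cancel, hc2]
        by_cases hx : l2[p] = 'x' <;> simp [hx]
    simp only [hcum1, hcum2]
    have hcand : total - pvCnt (l1.take (m + 1)) + pvCnt (l2.take m) = pvCand l1 l2 m := by
      rw [htot]; exact pvCand_sub l1 l2 m
    simp only [hcand]
    have hbest : (match pvBest l1 l2 m with
        | none => some (pvCand l1 l2 m)
        | some b => if b < pvCand l1 l2 m then some (pvCand l1 l2 m) else some b)
        = pvBest l1 l2 (m + 1) := by
      cases m with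
      | zero => simp [pvBest]
      | succ p =>
        simp only [pvBest, if_neg (Nat.succ_ne_zero p), if_neg (Nat.succ_ne_zero (p+1)),
          Nat.add_sub_cancel]
        rw [List.range_succ, List.map_append, List.foldl_append]
        simp only [List.map_cons, List.map_nil, List.foldl_cons, List.foldl_nil,
          Nat.succ_sub_one]
        rcases lt_or_ge (((List.range p).map (fun k => pvCand l1 l2 (k + 1))).foldl max
            (pvCand l1 l2 0)) (pvCand l1 l2 (p + 1)) with hlt | hge
        · rw [if_pos hlt, max_eq_right hlt.le]
        · rw [if_neg (not_lt.mpr hge), max_eq_left hge]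
    rw [hbest]
    simp only [Nat.add_sub_cancel]

-- PySem.Chars.count with a single-character needle is List.count
theorem pvCount_go_singleton (c : Char) :
    ∀ (fuel : Nat) (l : List Char) (acc : Nat), l.length ≤ fuel →
      PySem.Chars.count.go [c] fuel l acc = acc + l.count c := by
  intro fuel
  induction fuel with
  | zero => intro l acc h; simp at h; simp [h, PySem.Chars.count.go]
  | succ n ih =>
    intro l acc h
    cases l with
    | nil => simp [PySem.Chars.count.go]
    | cons hd t =>
      by_cases hc : c = hd
      · subst hc
        simp [PySem.Chars.count.go, List.isPrefixOf, ih t (acc + 1) (by simpa using h)]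
        omega
      · simp [PySem.Chars.count.go, List.isPrefixOf, hc, Ne.symm hc,
          ih t acc (by simpa using h)]

theorem pvCount_singleton (c : Char) (l : List Char) :
    PySem.Chars.count l [c] = l.count c := by
  simp [PySem.Chars.count, pvCount_go_singleton c l.length l 0 le_rfl]

-- B's value: the same maximum
theorem pvB_eq (L1 L2 : String) (h1 : L1.toList ≠ [])
    (h2 : L1.toList.length ≤ L2.toList.length + 1) :
    findMaxPotholes_alt L1 L2 =
      (((List.range (L1.toList.length - 1)).map
          (fun k => pvCand L1.toList L2.toList (k + 1))).foldl max
        (pvCand L1.toList L2.toList 0)) := by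
  have hn : 1 ≤ L1.toList.length := List.length_pos_of_ne_nil h1
  have htot : ((PySem.Str.count L1 "x" : Nat) : Int) = pvCnt L1.toList := by
    rw [PySem.Str.count_eq]
    show ((PySem.Chars.count L1.toList ['x'] : Nat) : Int) = pvCnt L1.toList
    rw [pvCount_singleton]
    rfl
  show ((PySem.List.pyRange 0 (PySem.List.len L1.toList) 1).foldl
      (fun (st : Int × Int × Option Int) i =>
        let cum1 := if PySem.List.pyGetD L1.toList i ' ' = 'x' then st.1 + 1 else st.1
        let cum2 := if 0 < i ∧ PySem.List.pyGetD L2.toList (i - 1) ' ' = 'x' then st.2.1 + 1 else st.2.1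
        let cand := ((PySem.Str.count L1 "x" : Nat) : Int) - cum1 + cum2
        let best : Option Int :=
          match st.2.2 with
          | none => some cand
          | some b => if b < cand then some cand else some b
        (cum1, cum2, best))
      (0, 0, none)).2.2.getD 0 = _
  rw [PySem.List.len_eq, PySem.List.pyRange_zero_nat,
    pvB_inv L1.toList L2.toList _ htot h2 L1.toList.length le_rfl]
  simp only [pvBest, if_neg (show ¬ L1.toList.length = 0 by omega)]
  rfl

-- ===== VERDICT (by name: the statement is the Claim_ definition above) =====
theorem findMaxPotholes_spec : Claim_equal_findMaxPotholes := by
  intro L1 L2 _ hPre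
  unfold Spec_findMaxPotholes
  rw [pvA_eq L1 L2 hPre.1 hPre.2, pvB_eq L1 L2 hPre.1 hPre.2]
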